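-- pv_equiv track=rewrite | github.com/Kazhuu/movelister | pythonpath/movelister/masterList.py | getPossibleVariations
-- ===== SOURCE A (Python) =====
-- import itertools
--
-- def getPossibleVariations(currentActionMods):
--     z = -1
--     tempMods1 = []
--     tempMods2 = []
--
--     # The loop unpacks all values from currentActionMods to tempMods2.
--     # Then calculates and appends all combinations of those values to tempMods1.
--     while z < len(currentActionMods) - 1:
--         tempMods2.clear()
--         z = z + 1
--         xyz = -1
--         while xyz < len(currentActionMods[z]) - 1:
--             xyz = xyz + 1
--             tempMods2.append(currentActionMods[z][xyz])
--             if len(tempMods2) > 0: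
--                 for L in range(0, len(tempMods2) + 1):
--                     for subset in itertools.combinations(tempMods2, L):
--                         tempMods1.append(subset)
--
--     # Converts tempMods1 into a set to delete all duplicates.
--     tempSet = set(tempMods1)
--     return tempSet
-- ===== SOURCE B (Python) =====
-- import itertools
--
-- def getPossibleVariations(currentActionMods):
--     # Each subsequence of a row is generated exactly once: choose its last
--     # element x (at position i) and a combination of earlier elements.
--     result = set()
--     for row in currentActionMods:
--         if row:
--             result.add(())
--         prefix = ()
--         for x in row:
--             for L in range(len(prefix) + 1):
--                 for head in itertools.combinations(prefix, L):
--                     result.add(head + (x,))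
--             prefix += (x,)
--     return result
-- ===== Notes on version B (the rewrite author's own statement) =====
-- stated objective: alternative
-- what changed: A re-enumerates the entire powerset of every growing prefix of each row into a duplicate-laden list and deduplicates with set() at the end; B builds the result set directly, generating each subsequence exactly once as (combination of strictly earlier elements) + (its last element), so no duplicate tuples and no intermediate list are created.
import Mathlib
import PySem

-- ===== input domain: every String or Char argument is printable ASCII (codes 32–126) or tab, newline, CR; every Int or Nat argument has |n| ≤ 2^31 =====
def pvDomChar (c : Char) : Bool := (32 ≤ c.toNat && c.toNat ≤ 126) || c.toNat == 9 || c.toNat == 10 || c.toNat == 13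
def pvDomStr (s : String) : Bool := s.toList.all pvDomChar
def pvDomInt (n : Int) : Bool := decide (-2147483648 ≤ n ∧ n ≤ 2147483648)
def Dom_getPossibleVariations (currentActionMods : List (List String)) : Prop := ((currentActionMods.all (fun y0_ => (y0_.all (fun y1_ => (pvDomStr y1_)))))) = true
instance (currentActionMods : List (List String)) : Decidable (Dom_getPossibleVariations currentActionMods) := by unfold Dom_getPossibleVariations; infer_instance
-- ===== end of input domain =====

-- B replaces A's re-enumeration of the whole powerset of every growing prefix (collected
-- with duplicates in a list and deduplicated by set() at the end) by a direct set build
-- that generates each subsequence exactly once, keyed by its last element.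

-- itertools.combinations(q, L) in itertools' lexicographic order (shared by both ports)
def pvCombos : Nat → List String → List (List String)
  | 0, _ => [[]]
  | _ + 1, [] => []
  | l + 1, x :: xs => (pvCombos l xs).map (fun c => x :: c) ++ pvCombos (l + 1) xs

-- ===== PORT A =====
-- inner 'for L in range(0, len(tempMods2)+1): for subset in combinations(...): tempMods1.append(subset)'
def pvBlockA (t1 : List (List String)) (q : List String) : List (List String) :=
  if q.length > 0 then
    (List.range (q.length + 1)).foldl (fun acc l => acc ++ pvCombos l q) t1
  else t1

-- the inner while loop: q grows one element of the row at a time (tempMods2)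
def pvInnerA (t1 : List (List String)) (pfx : List String) : List String → List (List String)
  | [] => t1
  | x :: rest => pvInnerA (pvBlockA t1 (pfx ++ [x])) (pfx ++ [x]) rest

def getPossibleVariations (currentActionMods : List (List String)) : List (List String) :=
  PySem.Set.ofList (currentActionMods.foldl (fun t1 row => pvInnerA t1 [] row) [])

-- ===== PORT B =====
-- 'for L in range(len(prefix)+1): for head in combinations(prefix, L): result.add(head + (x,))'
def pvBlockB (s : PySem.Set (List String)) (pfx : List String) (x : String) : PySem.Set (List String) :=
  (List.range (pfx.length + 1)).foldl
    (fun s l => (pvCombos l pfx).foldl (fun s head => PySem.Set.add s (head ++ [x])) s) s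

-- 'for x in row: … ; prefix += (x,)'
def pvInnerB (s : PySem.Set (List String)) (pfx : List String) : List String → PySem.Set (List String)
  | [] => s
  | x :: rest => pvInnerB (pvBlockB s pfx x) (pfx ++ [x]) rest

def getPossibleVariations_alt (currentActionMods : List (List String)) : List (List String) :=
  currentActionMods.foldl
    (fun s row => pvInnerB (if row.isEmpty then s else PySem.Set.add s []) [] row) PySem.Set.empty

-- ===== PRECONDITION & SPEC =====
def Spec_getPossibleVariations (currentActionMods : List (List String)) (out : List (List String)) : Prop := out = getPossibleVariations_alt currentActionMods
instance (currentActionMods : List (List String)) (out : List (List String)) : Decidable (Spec_getPossibleVariations currentActionMods out) := by unfold Spec_getPossibleVariations; infer_instance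

-- ===== CLAIM (what is proved, stated in full; the proofs are below) =====
def Claim_equal_getPossibleVariations : Prop := ∀ (currentActionMods : List (List String)), Dom_getPossibleVariations currentActionMods → Spec_getPossibleVariations currentActionMods (getPossibleVariations currentActionMods)

-- ===== LEMMAS AND PROOFS =====

theorem pv_update_append (s : PySem.Set (List String)) (xs ys : List (List String)) :
    PySem.Set.update s (xs ++ ys) = PySem.Set.update (PySem.Set.update s xs) ys := by
  simp [PySem.Set.update, List.foldl_append]

theorem pv_mem_update (s : PySem.Set (List String)) (xs : List (List String)) (a : List String) :
    a ∈ PySem.Set.update s xs ↔ a ∈ s ∨ a ∈ xs := by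
  induction xs generalizing s with
  | nil => simp [PySem.Set.update]
  | cons x xs ih =>
      simp only [PySem.Set.update, List.foldl_cons] at *
      rw [ih]
      rw [PySem.Set.mem_add]
      simp [or_assoc, or_comm, or_left_comm]

theorem pv_mem_update_of_mem (s : PySem.Set (List String)) (xs : List (List String))
    (a : List String) (h : a ∈ s) : a ∈ PySem.Set.update s xs :=
  (pv_mem_update s xs a).mpr (Or.inl h)

theorem pv_add_of_mem (s : PySem.Set (List String)) (a : List String) (h : a ∈ s) :
    PySem.Set.add s a = s := by
  simp [PySem.Set.add, h]

theorem pv_update_cons_of_mem (s : PySem.Set (List String)) (L : List (List String))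
    (a : List String) (h : a ∈ s) :
    PySem.Set.update s (a :: L) = PySem.Set.update s L := by
  simp [PySem.Set.update, pv_add_of_mem s a h]

theorem pv_sublist_mem_combos (c q : List String) (h : c.Sublist q) :
    c ∈ pvCombos c.length q := by
  induction h with
  | slnil => simp [pvCombos]
  | @cons c q x _ ih =>
      cases c with
      | nil => simp [pvCombos]
      | cons y c' =>
          simp only [List.length_cons, pvCombos, List.mem_append]
          exact Or.inr ih
  | @cons₂ c q x _ ih =>
      simp only [List.length_cons, pvCombos, List.mem_append, List.mem_map]
      exact Or.inl ⟨c, ih, rfl⟩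

-- the core exchange: all combinations of (q ++ [x]) of size l+1, added after everything
-- (pre ++ sublist of q) is already present, add exactly the combinations of q extended by x
theorem pvG (q : List String) (l : Nat) (pre : List String) (x : String)
    (s : PySem.Set (List String)) (hs : ∀ c, c.Sublist q → (pre ++ c) ∈ s) :
    PySem.Set.update s ((pvCombos (l + 1) (q ++ [x])).map (fun c => pre ++ c)) =
    PySem.Set.update s ((pvCombos l q).map (fun c => pre ++ (c ++ [x]))) := by
  induction q generalizing l pre s with
  | nil =>
      cases l with
      | zero => simp [pvCombos]
      | succ l => simp [pvCombos]
  | cons y ys ih =>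
      have hyspre : ∀ c : List String, c.Sublist ys → (pre ++ [y]) ++ c ∈ s := fun c hc => by
        have := hs (y :: c) (hc.cons₂ y); simpa using this
      have e1 : ∀ (k : Nat) (zs : List String),
          (pvCombos k zs).map ((fun c => pre ++ c) ∘ (fun c => y :: c)) =
          (pvCombos k zs).map (fun c => (pre ++ [y]) ++ c) := by
        intro k zs; apply List.map_congr_left; intro c _; simp
      cases l with
      | zero =>
          have h1 : pre ++ [y] ∈ s := hs [y] (List.Sublist.cons₂ y (List.nil_sublist ys))
          simp only [pvCombos, List.cons_append, List.map_cons,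
            List.map_nil, List.nil_append]
          rw [pv_update_cons_of_mem s _ _ h1]
          have h2 := ih 0 pre s (fun c hc => hs c (hc.cons y))
          simpa [pvCombos] using h2
      | succ m =>
          simp only [pvCombos, List.cons_append, List.map_append, List.map_map]
          rw [pv_update_append, pv_update_append, e1 (m + 1) (ys ++ [x])]
          have hA1 := ih m (pre ++ [y]) s hyspre
          rw [hA1]
          have eR1 : (pvCombos m ys).map (fun c => (pre ++ [y]) ++ (c ++ [x])) =
              (pvCombos m ys).map ((fun c => pre ++ (c ++ [x])) ∘ (fun c => y :: c)) := by
            apply List.map_congr_left; intro c _; simp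
          rw [eR1]
          apply ih (m + 1) pre
          intro c hc
          exact pv_mem_update_of_mem _ _ _ (hs c (hc.cons y))

-- specialisation of pvG to empty context
theorem pvG0 (q : List String) (l : Nat) (x : String) (s : PySem.Set (List String))
    (hs : ∀ c, c.Sublist q → c ∈ s) :
    PySem.Set.update s (pvCombos (l + 1) (q ++ [x])) =
    PySem.Set.update s ((pvCombos l q).map (fun c => c ++ [x])) := by
  have h := pvG q l [] x s (fun c hc => by simpa using hs c hc)
  simpa using h

-- A's block written as a flat list of combinations
def pvBlockList (q : List String) : List (List String) :=
  (List.range (q.length + 1)).flatMap (fun l => pvCombos l q)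

theorem pv_blockA_eq (t1 : List (List String)) (q : List String) (hq : q ≠ []) :
    pvBlockA t1 q = t1 ++ pvBlockList q := by
  have : q.length > 0 := List.length_pos_of_ne_nil hq
  simp only [pvBlockA, if_pos this, pvBlockList]
  exact PySem.List.foldl_append_eq_flatMap _ _ _

theorem pv_update_flatMap (s : PySem.Set (List String)) (ls : List Nat)
    (f : Nat → List (List String)) :
    PySem.Set.update s (ls.flatMap f) = ls.foldl (fun s l => PySem.Set.update s (f l)) s := by
  induction ls generalizing s with
  | nil => rfl
  | cons l ls ih => simp only [List.flatMap_cons, pv_update_append, List.foldl_cons, ih]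

theorem pv_rangefold (pfx : List String) (x : String) (ls : List Nat) :
    ∀ s : PySem.Set (List String), (∀ c, c.Sublist pfx → c ∈ s) →
    ls.foldl (fun s l => PySem.Set.update s (pvCombos (l + 1) (pfx ++ [x]))) s =
    ls.foldl (fun s l => PySem.Set.update s ((pvCombos l pfx).map (fun c => c ++ [x]))) s := by
  induction ls with
  | nil => intro s _; rfl
  | cons l ls ih =>
      intro s hs
      simp only [List.foldl_cons]
      rw [pvG0 pfx l x s hs]
      exact ih _ (fun c hc => pv_mem_update_of_mem _ _ _ (hs c hc))

-- A's whole block for prefix pfx ++ [x] adds exactly what B's block adds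
theorem pv_block_eq (pfx : List String) (x : String) (s : PySem.Set (List String))
    (hs : ∀ c, c.Sublist pfx → c ∈ s) :
    PySem.Set.update s (pvBlockList (pfx ++ [x])) = pvBlockB s pfx x := by
  have hlen : (pfx ++ [x]).length + 1 = pfx.length + 2 := by simp
  rw [pvBlockList, hlen, pv_update_flatMap]
  rw [List.range_succ_eq_map, List.foldl_cons, List.foldl_map]
  have h0 : PySem.Set.update s (pvCombos 0 (pfx ++ [x])) = s := by
    simp [pvCombos, PySem.Set.update, pv_add_of_mem s [] (hs [] (List.nil_sublist pfx))]
  rw [h0]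
  have hfold := pv_rangefold pfx x (List.range (pfx.length + 1)) s hs
  rw [hfold]
  simp only [pvBlockB]
  congr 1
  funext s' l
  rw [PySem.Set.update, List.foldl_map]

theorem pv_innerA_append (rest : List String) (t1 : List (List String)) (pfx : List String) :
    pvInnerA t1 pfx rest = t1 ++ pvInnerA [] pfx rest := by
  induction rest generalizing t1 pfx with
  | nil => simp [pvInnerA]
  | cons x rest ih =>
      have hne : pfx ++ [x] ≠ [] := by simp
      simp only [pvInnerA]
      rw [ih (pvBlockA t1 (pfx ++ [x])), ih (pvBlockA [] (pfx ++ [x])),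
        pv_blockA_eq _ _ hne, pv_blockA_eq _ _ hne]
      simp [List.append_assoc]

theorem pv_row_eq (rest pfx : List String) (s : PySem.Set (List String))
    (hs : ∀ c, c.Sublist pfx → c ∈ s) :
    PySem.Set.update s (pvInnerA [] pfx rest) = pvInnerB s pfx rest := by
  induction rest generalizing pfx s with
  | nil => rfl
  | cons x rest ih =>
      have hne : pfx ++ [x] ≠ [] := by simp
      simp only [pvInnerA, pvInnerB]
      rw [pv_innerA_append rest (pvBlockA [] (pfx ++ [x])), pv_blockA_eq _ _ hne,
        List.nil_append, pv_update_append, pv_block_eq pfx x s hs]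
      apply ih
      intro c hc
      rw [← pv_block_eq pfx x s hs]
      apply (pv_mem_update _ _ _).mpr
      right
      simp only [pvBlockList, List.mem_flatMap]
      refine ⟨c.length, ?_, pv_sublist_mem_combos c _ hc⟩
      simp only [List.mem_range]
      have := hc.length_le
      simp only [List.length_append, List.length_cons, List.length_nil] at this ⊢
      omega

theorem pv_one_row (s : PySem.Set (List String)) (row : List String) :
    PySem.Set.update s (pvInnerA [] [] row) =
    pvInnerB (if row.isEmpty then s else PySem.Set.add s []) [] row := by
  cases row with
  | nil => rfl
  | cons x rest =>
      simp only [List.isEmpty_cons, Bool.false_eq_true]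
      simp only [pvInnerA, pvInnerB, List.nil_append]
      rw [pv_innerA_append rest (pvBlockA [] [x]), pv_update_append]
      have hA : pvBlockA [] [x] = [[], [x]] := by
        simp [pvBlockA, List.range_succ, pvCombos]
      have hB : pvBlockB (PySem.Set.add s []) [] x =
          PySem.Set.add (PySem.Set.add s []) [x] := by
        simp [pvBlockB, List.range_succ, pvCombos]
      have hblock : PySem.Set.update s (pvBlockA [] [x]) = pvBlockB (PySem.Set.add s []) [] x := by
        rw [hA, hB]; rfl
      rw [hblock]
      apply pv_row_eq
      intro c hc
      rw [hB]
      rcases List.sublist_singleton.mp hc with rfl | rfl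
      · exact (PySem.Set.mem_add _ _ _).mpr (Or.inl ((PySem.Set.mem_add _ _ _).mpr (Or.inr rfl)))
      · exact (PySem.Set.mem_add _ _ _).mpr (Or.inr rfl)

theorem pv_top (mods : List (List String)) (t : List (List String)) (s : PySem.Set (List String)) :
    PySem.Set.update s (mods.foldl (fun t1 row => pvInnerA t1 [] row) t) =
    mods.foldl (fun s row => pvInnerB (if row.isEmpty then s else PySem.Set.add s []) [] row)
      (PySem.Set.update s t) := by
  induction mods generalizing t s with
  | nil => rfl
  | cons row mods ih =>
      simp only [List.foldl_cons]
      rw [ih]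
      congr 1
      rw [pv_innerA_append row t [], pv_update_append]
      exact pv_one_row _ row

-- ===== VERDICT (by name: the statement is the Claim_ definition above) =====
theorem getPossibleVariations_spec : Claim_equal_getPossibleVariations := by
  intro mods _
  unfold Spec_getPossibleVariations getPossibleVariations getPossibleVariations_alt
  rw [PySem.Set.ofList_eq_foldl]
  have h := pv_top mods [] PySem.Set.empty
  simpa [PySem.Set.update, PySem.Set.empty] using h
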